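-- pv_equiv track=rewrite | github.com/shiftshapr/bitcoinGames | Los Pixales/analysisComplete.py | is_power_of_7
-- ===== SOURCE A (Python) =====
-- def is_power_of_7(n):
--     if n == 0:
--         return False
--     n_str = str(n)
--     power = 0
--     temp = int(n_str)
--     while temp % 7 == 0:
--         temp //= 7
--         power += 1
--     return temp == 1
-- ===== SOURCE B (Python) =====
-- def is_power_of_7(n):
--     temp = int(str(n))
--     p = 1
--     while p < temp:
--         p *= 7
--     return p == temp
-- ===== Notes on version B (the rewrite author's own statement) =====
-- stated objective: simpler
-- what changed: B builds powers of 7 upward (p = 1; while p < temp: p *= 7; return p == temp) instead of dividing n down while divisible by 7, which also makes the explicit zero guard unnecessary.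
import Mathlib
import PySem

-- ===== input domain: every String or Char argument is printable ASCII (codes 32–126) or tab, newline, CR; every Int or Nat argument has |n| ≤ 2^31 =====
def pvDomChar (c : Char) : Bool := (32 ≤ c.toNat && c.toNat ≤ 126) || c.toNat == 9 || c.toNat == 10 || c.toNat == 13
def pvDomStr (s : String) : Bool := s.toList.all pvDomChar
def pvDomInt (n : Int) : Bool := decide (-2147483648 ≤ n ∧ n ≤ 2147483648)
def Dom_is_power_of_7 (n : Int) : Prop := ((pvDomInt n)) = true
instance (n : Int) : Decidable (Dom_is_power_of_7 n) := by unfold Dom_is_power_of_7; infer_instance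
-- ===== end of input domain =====

-- B replaces A's divide-down loop by one that builds powers of 7 upward, so the zero guard
-- disappears; same return value on every int, no speed claim.

-- ===== PORT A =====
-- A's while loop: 'while temp % 7 == 0: temp //= 7; power += 1'.
-- The 't ≠ 0' conjunct is a totality guard only (Python's loop is only reached with temp ≠ 0
-- and temp stays nonzero); on every reachable state the condition coincides with Python's.
def pvLoopA (t p : Int) : Int × Int :=
  if h : t ≠ 0 ∧ PySem.Int.mod t 7 = 0 then
    pvLoopA (PySem.Int.floordiv t 7) (p + 1)
  else (t, p)
termination_by t.natAbs
decreasing_by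
  obtain ⟨ht, hm⟩ := h
  rw [PySem.Int.floordiv_eq_ediv_of_pos (by norm_num)]
  obtain ⟨k, rfl⟩ := (PySem.Int.mod_eq_zero_iff_dvd t 7).mp hm
  rw [Int.mul_ediv_cancel_left _ (by norm_num)]
  omega

def is_power_of_7 (n : Int) : Bool :=
  if n = 0 then false
  else
    -- n_str = str(n); temp = int(n_str): identity on an int argument
    let temp := n
    let r := pvLoopA temp 0
    r.1 == 1

-- ===== PORT B =====
-- B's while loop: 'while p < temp: p *= 7'.
-- The '0 < p' conjunct is a totality guard only (B always starts at p = 1 and p only grows).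
def pvLoopB (p t : Int) : Int :=
  if h : 0 < p ∧ p < t then pvLoopB (p * 7) t else p
termination_by (t - p).toNat
decreasing_by omega

def is_power_of_7_alt (n : Int) : Bool :=
  let temp := n   -- temp = int(str(n)): identity on an int argument
  pvLoopB 1 temp == temp

-- ===== PRECONDITION & SPEC =====
def Spec_is_power_of_7 (n : Int) (out : Bool) : Prop := out = is_power_of_7_alt n
instance (n : Int) (out : Bool) : Decidable (Spec_is_power_of_7 n out) := by unfold Spec_is_power_of_7; infer_instance

-- ===== CLAIM (what is proved, stated in full; the proofs are below) =====
def Claim_equal_is_power_of_7 : Prop := ∀ (n : Int), Dom_is_power_of_7 n → Spec_is_power_of_7 n (is_power_of_7 n)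

-- ===== LEMMAS AND PROOFS =====

theorem pvLoopA_char : ∀ (t p : Int), t ≠ 0 → ((pvLoopA t p).1 = 1 ↔ ∃ k : ℕ, t = 7 ^ k) := by
  intro t p
  induction t, p using pvLoopA.induct with
  | case1 t p h ih =>
    intro _
    obtain ⟨ht, hm⟩ := h
    obtain ⟨c, rfl⟩ := (PySem.Int.mod_eq_zero_iff_dvd t 7).mp hm
    have hc : c ≠ 0 := by rintro rfl; simp at ht
    have hdiv : PySem.Int.floordiv (7 * c) 7 = c := by
      rw [PySem.Int.floordiv_eq_ediv_of_pos (by norm_num)]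
      exact Int.mul_ediv_cancel_left _ (by norm_num)
    rw [pvLoopA, dif_pos ⟨ht, hm⟩, hdiv]
    rw [hdiv] at ih
    rw [ih hc]
    constructor
    · rintro ⟨k, rfl⟩; exact ⟨k + 1, by ring⟩
    · rintro ⟨k, hk⟩
      cases k with
      | zero => exfalso; simp at hk; omega
      | succ m =>
        refine ⟨m, ?_⟩
        have : (7 : Int) * c = 7 * 7 ^ m := by rw [hk]; ring
        omega
  | case2 t p h =>
    intro ht
    rw [pvLoopA, dif_neg h]
    have hm : PySem.Int.mod t 7 ≠ 0 := by tauto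
    have hnd : ¬ (7 : Int) ∣ t := fun hd => hm ((PySem.Int.mod_eq_zero_iff_dvd t 7).mpr hd)
    constructor
    · rintro rfl; exact ⟨0, rfl⟩
    · rintro ⟨k, rfl⟩
      cases k with
      | zero => rfl
      | succ m => exact absurd ⟨7 ^ m, by ring⟩ hnd

theorem pvLoopB_char (t : Int) : ∀ (p : Int), 0 < p →
    (pvLoopB p t = t ↔ (t = p ∨ (p < t ∧ ∃ k : ℕ, t = p * 7 ^ k))) := by
  intro p
  induction p using pvLoopB.induct (t := t) with
  | case1 p h ih =>
    intro _
    obtain ⟨hp, hlt⟩ := h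
    rw [pvLoopB, dif_pos ⟨hp, hlt⟩, ih (by omega)]
    constructor
    · rintro (rfl | ⟨hlt7, k, rfl⟩)
      · exact Or.inr ⟨hlt, 1, by ring⟩
      · exact Or.inr ⟨hlt, k + 1, by ring⟩
    · rintro (rfl | ⟨_, k, rfl⟩)
      · omega
      · cases k with
        | zero => simp at hlt
        | succ m =>
          cases m with
          | zero => exact Or.inl (by ring)
          | succ j =>
            refine Or.inr ⟨?_, j + 1, by ring⟩
            have h7 : (1 : Int) < 7 ^ (j + 1) :=
              one_lt_pow₀ (by norm_num : (1:Int) < 7) (Nat.succ_ne_zero j)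
            calc p * 7 = p * 7 * 1 := by ring
              _ < p * 7 * 7 ^ (j + 1) := by
                  exact mul_lt_mul_of_pos_left h7 (by omega)
              _ = p * 7 ^ (j + 1 + 1) := by ring
  | case2 p h =>
    intro hp
    rw [pvLoopB, dif_neg h]
    have : ¬ p < t := by tauto
    constructor
    · rintro rfl; exact Or.inl rfl
    · rintro (rfl | ⟨hlt, _⟩)
      · rfl
      · omega

theorem alt_char (n : Int) : is_power_of_7_alt n = true ↔ ∃ k : ℕ, n = 7 ^ k := by
  show (pvLoopB 1 n == n) = true ↔ _
  rw [beq_iff_eq, pvLoopB_char n 1 (by norm_num)]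
  constructor
  · rintro (rfl | ⟨_, k, hk⟩)
    · exact ⟨0, rfl⟩
    · exact ⟨k, by omega⟩
  · rintro ⟨k, rfl⟩
    cases k with
    | zero => exact Or.inl rfl
    | succ m =>
      refine Or.inr ⟨one_lt_pow₀ (by norm_num : (1:Int) < 7) (Nat.succ_ne_zero m), m + 1, by ring⟩

-- ===== VERDICT (by name: the statement is the Claim_ definition above) =====
theorem is_power_of_7_spec : Claim_equal_is_power_of_7 := by
  intro n _
  show is_power_of_7 n = is_power_of_7_alt n
  by_cases hn : n = 0
  · subst hn
    show false = is_power_of_7_alt 0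
    have : is_power_of_7_alt 0 = false := by
      rw [Bool.eq_false_iff]
      intro h
      obtain ⟨k, hk⟩ := (alt_char 0).mp h
      have : (0:Int) < 7 ^ k := pow_pos (by norm_num) k
      omega
    rw [this]
  · rw [Bool.eq_iff_iff]
    have hA : is_power_of_7 n = true ↔ (pvLoopA n 0).1 = 1 := by
      simp [is_power_of_7, hn]
    rw [hA, pvLoopA_char n 0 hn, alt_char]
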